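-- pv_equiv track=rewrite | github.com/all-day-and-night/algorithms | beakjoon/iSharp.py | addType
-- ===== SOURCE A (Python) =====
-- def addType(temp):
--     result = []
--
--     while temp:
--         if temp[-1].isalpha():
--             break
--         if temp[-1] == ']':
--             temp.pop()
--             result.append('[')
--         elif temp[-1] == '[':
--             temp.pop()
--             result.append(']')
--         else:
--             result.append(temp.pop())
--     return ''.join(result) + " " + ''.join(temp)
-- ===== SOURCE B (Python) =====
-- def addType(temp):
--     # Scan from the end to collect the trailing non-alpha run (tail is in
--     # popped order, i.e. reversed), swap brackets in one comprehension,
--     # then truncate temp in place like A does.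
--     tail = []
--     for x in reversed(temp):
--         if x.isalpha():
--             break
--         tail.append(x)
--     k = len(temp) - len(tail)
--     result = ''.join(']' if x == '[' else '[' if x == ']' else x for x in tail)
--     del temp[k:]
--     return result + ' ' + ''.join(temp)
-- ===== Notes on version B (the rewrite author's own statement) =====
-- stated objective: simpler
-- what changed: Replaces A's pop-one-element-at-a-time while loop with a single split of the trailing non-alpha run (one reverse scan up to the first alpha element) followed by one bracket-swapping join and one slice deletion.
import Mathlib
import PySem

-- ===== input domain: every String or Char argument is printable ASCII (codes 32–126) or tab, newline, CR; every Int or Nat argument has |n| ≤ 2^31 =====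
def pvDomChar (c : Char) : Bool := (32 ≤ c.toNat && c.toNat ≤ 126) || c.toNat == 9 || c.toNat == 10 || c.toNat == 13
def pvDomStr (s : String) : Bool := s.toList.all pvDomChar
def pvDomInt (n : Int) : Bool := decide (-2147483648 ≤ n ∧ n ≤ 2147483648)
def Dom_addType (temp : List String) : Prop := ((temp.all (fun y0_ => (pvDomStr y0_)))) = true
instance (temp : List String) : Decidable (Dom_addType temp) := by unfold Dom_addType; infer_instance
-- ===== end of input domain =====

-- B replaces A's pop-one-at-a-time while loop by a single split of the trailing
-- non-alpha run (takeWhile on the reversed list) plus one map; objective: simpler.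
-- Both A and B mutate the Python argument in place the same way (A pops the
-- trailing run, B deletes it); the equivalence proved here is about the return value.

-- ===== PORT A =====
-- A's while loop pops from the END of temp; ported as recursion over temp.reverse,
-- carrying the same (remaining, result) state.
def addTypeLoop (rtemp result : List String) : List String × List String :=
  match rtemp with
  | [] => ([], result)
  | x :: xs =>
    if PySem.Str.strIsalpha x then (x :: xs, result)
    else if x = "]" then addTypeLoop xs (result ++ ["["])
    else if x = "[" then addTypeLoop xs (result ++ ["]"])
    else addTypeLoop xs (result ++ [x])

def addType (temp : List String) : String :=
  let p := addTypeLoop temp.reverse []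
  String.join p.2 ++ " " ++ String.join p.1.reverse

-- ===== PORT B =====
def pvSwap (x : String) : String := if x = "[" then "]" else if x = "]" then "[" else x

def addType_alt (temp : List String) : String :=
  let tail := temp.reverse.takeWhile (fun x => !PySem.Str.strIsalpha x)
  let k := temp.length - tail.length
  String.join (tail.map pvSwap) ++ " " ++ String.join (temp.take k)

-- ===== PRECONDITION & SPEC =====
def Spec_addType (temp : List String) (out : String) : Prop := out = addType_alt temp
instance (temp : List String) (out : String) : Decidable (Spec_addType temp out) := by unfold Spec_addType; infer_instance

-- ===== CLAIM (what is proved, stated in full; the proofs are below) =====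
def Claim_equal_addType : Prop := ∀ (temp : List String), Dom_addType temp → Spec_addType temp (addType temp)

-- ===== LEMMAS AND PROOFS =====

-- A's loop computes the takeWhile/dropWhile split of the reversed list,
-- with the collected elements bracket-swapped.
theorem addTypeLoop_eq (rtemp result : List String) :
    addTypeLoop rtemp result =
      (rtemp.dropWhile (fun x => !PySem.Str.strIsalpha x),
       result ++ (rtemp.takeWhile (fun x => !PySem.Str.strIsalpha x)).map pvSwap) := by
  induction rtemp generalizing result with
  | nil => simp [addTypeLoop]
  | cons x xs ih =>
    by_cases ha : PySem.Chars.strIsalpha x.toList = true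
    · simp [addTypeLoop, PySem.Str.strIsalpha, ha]
    · simp only [Bool.not_eq_true] at ha
      by_cases h1 : x = "]"
      · subst h1
        simp [addTypeLoop, PySem.Str.strIsalpha, (by decide : PySem.Chars.strIsalpha [']'] = false),
          ih, pvSwap]
      · by_cases h2 : x = "["
        · subst h2
          simp [addTypeLoop, PySem.Str.strIsalpha, (by decide : PySem.Chars.strIsalpha ['['] = false),
            ih, pvSwap]
        · simp [addTypeLoop, PySem.Str.strIsalpha, ha, h1, h2, ih, pvSwap]

-- taking the first (length − |trailing run|) elements is dropping the run.
theorem rev_take_eq (l : List String) (p : String → Bool) :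
    l.reverse.take (l.length - (l.takeWhile p).length) = (l.dropWhile p).reverse := by
  have hsplit : l.takeWhile p ++ l.dropWhile p = l := List.takeWhile_append_dropWhile
  have hlen : l.length - (l.takeWhile p).length = (l.dropWhile p).reverse.length := by
    have := congrArg List.length hsplit
    simp only [List.length_append] at this
    simp [← this]
  rw [hlen]
  calc l.reverse.take (l.dropWhile p).reverse.length
      = ((l.dropWhile p).reverse ++ (l.takeWhile p).reverse).take (l.dropWhile p).reverse.length := by
        rw [← List.reverse_append, hsplit]
    _ = (l.dropWhile p).reverse := List.take_left

-- ===== VERDICT (by name: the statement is the Claim_ definition above) =====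
theorem addType_spec : Claim_equal_addType := by
  intro temp _
  unfold Spec_addType addType addType_alt
  rw [addTypeLoop_eq]
  have h := rev_take_eq temp.reverse (fun x => !PySem.Chars.strIsalpha x.toList)
  rw [List.reverse_reverse, List.length_reverse] at h
  simp [PySem.Str.strIsalpha, h]
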